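-- pv_equiv track=rewrite | github.com/AaronYu94/TA-MPQ | src/ta_mpq/quant_search/policy_hash.py | duplicate_policy_hashes
-- ===== SOURCE A (Python) =====
-- from typing import Any, Iterable
--
-- def duplicate_policy_hashes(items: list[dict[str, Any]]) -> dict[str, list[str]]:
--     grouped: dict[str, list[str]] = {}
--     for item in items:
--         policy_hash = str(item["policy_hash"])
--         grouped.setdefault(policy_hash, []).append(str(item.get("policy_id", policy_hash)))
--     return {
--         policy_hash: policy_ids
--         for policy_hash, policy_ids in grouped.items()
--         if len(policy_ids) > 1
--     }
-- ===== SOURCE B (Python) =====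
-- def duplicate_policy_hashes(items):
--     # Pass 1: key of every item, and how often each hash occurs.
--     hashes = [str(item["policy_hash"]) for item in items]
--     counts = {}
--     for h in hashes:
--         counts[h] = counts.get(h, 0) + 1
--     # Pass 2: group only the items whose hash is duplicated.
--     out = {}
--     for item, h in zip(items, hashes):
--         if counts[h] > 1:
--             out.setdefault(h, []).append(str(item.get("policy_id", h)))
--     return out
-- ===== Notes on version B (the rewrite author's own statement) =====
-- stated objective: alternative
-- what changed: Replaced group-everything-then-filter with a two-pass scheme: first count hash occurrences, then a single filtered grouping pass that only ever builds the duplicated groups.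
-- outside the precondition, e.g. on duplicate_policy_hashes([{'policy_id': 'x'}]): A raises KeyError, B raises KeyError
import Mathlib
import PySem

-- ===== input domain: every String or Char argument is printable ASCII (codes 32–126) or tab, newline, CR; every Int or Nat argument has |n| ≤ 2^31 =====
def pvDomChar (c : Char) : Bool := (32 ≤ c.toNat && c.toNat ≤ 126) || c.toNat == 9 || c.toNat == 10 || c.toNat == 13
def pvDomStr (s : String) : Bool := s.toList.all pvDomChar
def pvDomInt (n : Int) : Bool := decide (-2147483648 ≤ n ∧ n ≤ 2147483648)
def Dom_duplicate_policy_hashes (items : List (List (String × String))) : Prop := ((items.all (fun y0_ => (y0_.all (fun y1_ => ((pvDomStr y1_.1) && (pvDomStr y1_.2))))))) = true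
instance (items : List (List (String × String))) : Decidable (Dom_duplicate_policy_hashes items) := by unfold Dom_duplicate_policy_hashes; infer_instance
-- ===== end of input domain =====

-- B replaces A's group-everything-then-filter with count-hashes-first, then a single filtered
-- grouping pass that only builds the duplicated groups (alternative decomposition, same cost).

-- ===== PORT A =====
def duplicate_policy_hashes (items : List (List (String × String))) : List (String × List String) :=
  let grouped : PySem.Dict String (List String) :=
    items.foldl (fun g item =>
      let ph := (PySem.Dict.mk item).getD "policy_hash" ""   -- item["policy_hash"]; KeyError excluded by Pre_
      g.modify ph [] (fun ids => ids ++ [(PySem.Dict.mk item).getD "policy_id" ph]))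
      PySem.Dict.empty
  grouped.items.filter (fun p => p.2.length > 1)

-- ===== PORT B =====
def duplicate_policy_hashes_alt (items : List (List (String × String))) : List (String × List String) :=
  let hashes : List String :=
    items.map (fun item => (PySem.Dict.mk item).getD "policy_hash" "")   -- KeyError excluded by Pre_
  let counts : PySem.Dict String Int :=
    hashes.foldl (fun d h => d.insert h (d.getD h 0 + 1)) PySem.Dict.empty
  let out : PySem.Dict String (List String) :=
    (items.zip hashes).foldl (fun o p =>
      if counts.getD p.2 0 > 1 then
        o.modify p.2 [] (fun ids => ids ++ [(PySem.Dict.mk p.1).getD "policy_id" p.2])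
      else o)
      PySem.Dict.empty
  out.items

-- ===== PRECONDITION & SPEC =====
-- Pre_ excludes exactly the inputs with an item missing the "policy_hash" key, on which Python A raises KeyError.
def Pre_duplicate_policy_hashes (items : List (List (String × String))) : Prop :=
  (items.all (fun item => item.any (fun p => p.1 == "policy_hash"))) = true
instance (items : List (List (String × String))) : Decidable (Pre_duplicate_policy_hashes items) := by unfold Pre_duplicate_policy_hashes; infer_instance
def pvWitness_duplicate_policy_hashes : (List (List (String × String))) :=
  [[("policy_hash", "h"), ("policy_id", "a")], [("policy_hash", "h")]]
def Spec_duplicate_policy_hashes (items : List (List (String × String))) (out : List (String × List String)) : Prop := out = duplicate_policy_hashes_alt items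
instance (items : List (List (String × String))) (out : List (String × List String)) : Decidable (Spec_duplicate_policy_hashes items out) := by unfold Spec_duplicate_policy_hashes; infer_instance

-- ===== CLAIM (what is proved, stated in full; the proofs are below) =====
def Claim_equal_duplicate_policy_hashes : Prop := ∀ (items : List (List (String × String))), Dom_duplicate_policy_hashes items → Pre_duplicate_policy_hashes items → Spec_duplicate_policy_hashes items (duplicate_policy_hashes items)

-- ===== LEMMAS AND PROOFS =====

-- the hash key of an item, and the (hash, id) pair both loops really process
def pvKey (item : List (String × String)) : String :=
  (PySem.Dict.mk item).getD "policy_hash" ""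
def pvPair (item : List (String × String)) : String × String :=
  (pvKey item, (PySem.Dict.mk item).getD "policy_id" (pvKey item))
-- the grouping loop common to both programs, over (hash, id) pairs
def pvGroup (l : List (String × String)) : PySem.Dict String (List String) :=
  l.foldl (fun g p => g.modify p.1 [] (fun ids => ids ++ [p.2])) PySem.Dict.empty

theorem pv_zip_self_map {α β : Type} (l : List α) (g : α → β) :
    l.zip (l.map g) = l.map (fun a => (a, g a)) := by
  induction l with
  | nil => rfl
  | cons x xs ih => simp [ih]

-- Python set(…) (first-occurrence dedup) commutes with filtering
theorem pv_ofList_filter (q : String → Bool) (xs : List String) :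
    PySem.Set.ofList (xs.filter q) = (PySem.Set.ofList xs).filter q := by
  induction xs with
  | nil => rfl
  | cons x xs ih =>
    by_cases hq : q x
    · rw [List.filter_cons_of_pos hq, PySem.Set.ofList_cons, PySem.Set.ofList_cons,
        List.filter_cons_of_pos hq, ih, PySem.Set.discard, PySem.Set.discard, List.filter_comm]
    · rw [List.filter_cons_of_neg (by simpa using hq), PySem.Set.ofList_cons,
        List.filter_cons_of_neg (by simpa using hq), ih, PySem.Set.discard, List.filter_filter]
      apply List.filter_congr
      intro a _
      by_cases hax : a = x
      · subst hax; simp [hq]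
      · simp [hax]

-- closed form of the grouping dict's items list
theorem pv_items_group (l : List (String × String)) :
    (pvGroup l).items =
      (PySem.Set.ofList (l.map (·.1))).map
        (fun k => (k, (l.filter (fun p => p.1 == k)).map (·.2))) := by
  have hnd : (pvGroup l).keys.Nodup :=
    PySem.Dict.nodup_keys_foldl_modify_key l (·.1) [] (fun _ p ids => ids ++ [p.2])
      PySem.Dict.empty PySem.Dict.nodup_keys_empty
  rw [PySem.Dict.items_eq_map_keys _ hnd []]
  have hk : (pvGroup l).keys = PySem.Set.ofList (l.map (·.1)) := by
    rw [pvGroup, PySem.Dict.keys_foldl_modify_key l (·.1) [] (fun _ p ids => ids ++ [p.2])]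
    exact PySem.Set.update_empty _
  rw [hk]
  apply List.map_congr_left
  intro k _
  rw [pvGroup, PySem.Dict.getD_foldl_modify_append l PySem.Dict.empty k]
  simp [PySem.Dict.getD_empty]

theorem pv_A_shape (items : List (List (String × String))) :
    duplicate_policy_hashes items =
      (pvGroup (items.map pvPair)).items.filter (fun p => p.2.length > 1) := by
  simp only [duplicate_policy_hashes, pvGroup, List.foldl_map, pvPair, pvKey]

theorem pv_B_shape (items : List (List (String × String))) :
    duplicate_policy_hashes_alt items =
      (pvGroup ((items.map pvPair).filter
        (fun p => decide (1 < ((items.map pvPair).map (·.1)).count p.1)))).items := by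
  simp only [duplicate_policy_hashes_alt]
  rw [pv_zip_self_map]
  simp only [PySem.Dict.getD_foldl_insert_add_one, PySem.Dict.getD_empty, zero_add]
  rw [pvGroup, List.foldl_filter]
  simp only [List.foldl_map]
  refine congrArg PySem.Dict.items (congrArg (fun f => List.foldl f PySem.Dict.empty items) ?_)
  funext o it
  simp only [pvPair, pvKey, List.map_map, Function.comp_def, decide_eq_true_eq, Nat.one_lt_cast,
    gt_iff_lt]

theorem pv_count_key (l : List (String × String)) (k : String) :
    (l.map (·.1)).count k = l.countP (fun p => p.1 == k) := by
  simp [List.count_eq_countP, List.countP_map, Function.comp_def, BEq.comm]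

-- filtering the full grouping to the duplicated keys = grouping only the duplicated-key pairs
theorem pv_group_filter (l : List (String × String)) :
    (pvGroup l).items.filter (fun p => p.2.length > 1) =
      (pvGroup (l.filter (fun p => decide (1 < (l.map (·.1)).count p.1)))).items := by
  rw [pv_items_group, pv_items_group, List.filter_map]
  have hkeys : (l.filter (fun p => decide (1 < (l.map (·.1)).count p.1))).map (·.1)
      = (l.map (·.1)).filter (fun h => decide (1 < (l.map (·.1)).count h)) := by
    rw [List.filter_map]; rfl
  rw [hkeys, pv_ofList_filter]
  have hpred : ((fun p : String × List String => decide (p.2.length > 1)) ∘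
        (fun k => (k, (l.filter (fun p => p.1 == k)).map (·.2))))
      = (fun h => decide (1 < (l.map (·.1)).count h)) := by
    funext k
    simp [pv_count_key, ← List.countP_eq_length_filter]
  rw [hpred]
  apply List.map_congr_left
  intro k hk
  have hcnt : 1 < (l.map (·.1)).count k := by
    simp only [List.mem_filter, decide_eq_true_eq] at hk
    exact hk.2
  congr 1
  rw [List.filter_filter]
  refine congrArg (List.map (fun x : String × String => x.2)) ?_
  apply List.filter_congr
  intro p _
  by_cases hpk : p.1 = k
  · simp [hpk, hcnt]
  · simp [hpk]

-- ===== VERDICT (by name: the statement is the Claim_ definition above) =====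
theorem duplicate_policy_hashes_spec : Claim_equal_duplicate_policy_hashes := by
  intro items _ _
  unfold Spec_duplicate_policy_hashes
  rw [pv_A_shape, pv_B_shape, pv_group_filter]
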